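-- pv_equiv track=rewrite | github.com/PedjaT/adventofcode_2023 | Day 14/Day 14.py | step
-- ===== SOURCE A (Python) =====
-- def step(l, direction='up'):
--     change=0
--     if direction == 'up':
--         for i in range(0,len(l)-1):
--             if l[i]=='.' and l[i+1]=='O':
--                 l[i], l[i+1]='O', '.'
--                 change=1
--     else:
--         for i in range(len(l) - 1, 0, -1):
--             if l[i] == '.' and l[i - 1] == 'O':
--                 l[i], l[i - 1] = 'O', '.'
--                 change = 1
--     return change
-- ===== SOURCE B (Python) =====
-- def step(l, direction='up'):
--     change = 0
--     n = len(l)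
--     if direction == 'up':
--         i = 0
--         while i < n - 1:
--             if l[i] == '.' and l[i + 1] == 'O':
--                 j = i + 1
--                 while j + 1 < n and l[j + 1] == 'O':
--                     j += 1
--                 l[i], l[j] = 'O', '.'
--                 change = 1
--                 i = j + 1
--             else:
--                 i += 1
--     else:
--         i = n - 1
--         while i > 0:
--             if l[i] == '.' and l[i - 1] == 'O':
--                 j = i - 1
--                 while j - 1 >= 0 and l[j - 1] == 'O':
--                     j -= 1
--                 l[i], l[j] = 'O', '.'
--                 change = 1
--                 i = j - 1
--             else:
--                 i -= 1
--     return change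
-- ===== Notes on version B (the rewrite author's own statement) =====
-- stated objective: alternative
-- what changed: B replaces A's full index-by-index scan of one-cell adjacent swaps by a jump scan that moves each maximal run of 'O' rocks with a single endpoint swap (fill the leading dot, empty the run's tail) and resumes past the run; same in-place mutation and 0/1 change flag.
import Mathlib
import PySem

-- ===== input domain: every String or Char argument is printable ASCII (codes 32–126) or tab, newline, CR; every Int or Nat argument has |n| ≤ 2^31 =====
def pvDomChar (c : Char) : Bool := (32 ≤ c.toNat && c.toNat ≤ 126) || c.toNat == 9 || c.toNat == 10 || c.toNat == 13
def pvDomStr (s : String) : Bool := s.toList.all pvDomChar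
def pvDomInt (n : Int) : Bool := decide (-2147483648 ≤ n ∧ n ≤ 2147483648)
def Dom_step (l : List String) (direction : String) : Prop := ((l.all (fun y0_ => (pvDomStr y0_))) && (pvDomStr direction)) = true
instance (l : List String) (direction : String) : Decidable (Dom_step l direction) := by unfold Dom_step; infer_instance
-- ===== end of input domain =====

-- B replaces A's one-cell-at-a-time cascade of adjacent swaps by a run-scan that moves each
-- maximal 'O'-run with one endpoint swap and jumps past it (objective: alternative).
-- Both Pythons mutate l in place identically; the equivalence proved here is about the RETURN value.

-- ===== PORT A =====
-- for i in range(0, len(l)-1): adjacent swap when l[i]=='.' and l[i+1]=='O'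
def upLoop (l : List String) (change : Int) (i : Nat) : Nat → List String × Int
  | 0 => (l, change)
  | fuel+1 =>
    if l.getD i "" = "." ∧ l.getD (i+1) "" = "O" then
      upLoop ((l.set i "O").set (i+1) ".") 1 (i+1) fuel
    else upLoop l change (i+1) fuel

-- for i in range(len(l)-1, 0, -1): current index is i+1, stop after index 1
def downLoop (l : List String) (change : Int) : Nat → List String × Int
  | 0 => (l, change)
  | i+1 =>
    if l.getD (i+1) "" = "." ∧ l.getD i "" = "O" then
      downLoop ((l.set (i+1) "O").set i ".") 1 i
    else downLoop l change i

def step (l : List String) (direction : String) : Int :=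
  if direction = "up" then (upLoop l 0 0 (l.length - 1)).2
  else (downLoop l 0 (l.length - 1)).2

-- ===== PORT B =====
-- B's Python uses while-loops; they are ported with an explicit fuel argument (l.length,
-- always enough since the loop index moves strictly each iteration) as a totality guard.

-- j = i+1; while j+1 < n and l[j+1] == 'O': j += 1
def runEnd (l : List String) (j : Nat) : Nat → Nat
  | 0 => j
  | fuel+1 =>
    if j + 1 < l.length ∧ l.getD (j+1) "" = "O" then runEnd l (j+1) fuel else j

-- j = i-1; while j-1 >= 0 and l[j-1] == 'O': j -= 1
def runStart (l : List String) (j : Nat) : Nat → Nat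
  | 0 => j
  | fuel+1 =>
    if 1 ≤ j ∧ l.getD (j-1) "" = "O" then runStart l (j-1) fuel else j

-- while i < n-1: endpoint swap of the maximal run, then i = j+1
def bUp (l : List String) (change : Int) (i : Nat) : Nat → List String × Int
  | 0 => (l, change)
  | fuel+1 =>
    if i < l.length - 1 then
      if l.getD i "" = "." ∧ l.getD (i+1) "" = "O" then
        let j := runEnd l (i+1) l.length
        bUp ((l.set i "O").set j ".") 1 (j+1) fuel
      else bUp l change (i+1) fuel
    else (l, change)

-- while i > 0: endpoint swap of the maximal run, then i = j-1
def bDown (l : List String) (change : Int) (i : Nat) : Nat → List String × Int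
  | 0 => (l, change)
  | fuel+1 =>
    if 1 ≤ i then
      if l.getD i "" = "." ∧ l.getD (i-1) "" = "O" then
        let j := runStart l (i-1) l.length
        bDown ((l.set i "O").set j ".") 1 (j-1) fuel
      else bDown l change (i-1) fuel
    else (l, change)

def step_alt (l : List String) (direction : String) : Int :=
  if direction = "up" then (bUp l 0 0 l.length).2
  else (bDown l 0 (l.length - 1) l.length).2

-- ===== PRECONDITION & SPEC =====
def Spec_step (l : List String) (direction : String) (out : Int) : Prop := out = step_alt l direction
instance (l : List String) (direction : String) (out : Int) : Decidable (Spec_step l direction out) := by unfold Spec_step; infer_instance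

-- ===== CLAIM (what is proved, stated in full; the proofs are below) =====
def Claim_equal_step : Prop := ∀ (l : List String) (direction : String), Dom_step l direction → Spec_step l direction (step l direction)

-- ===== LEMMAS AND PROOFS =====

-- the adjacent patterns driving a swap ('.','O' looking up / 'O','.' looking down)
def patU (l : List String) (k : Nat) : Prop := l.getD k "" = "." ∧ l.getD (k+1) "" = "O"
def patD (l : List String) (k : Nat) : Prop := l.getD k "" = "." ∧ l.getD (k-1) "" = "O"

theorem runEnd_ge (fuel : Nat) : ∀ (l : List String) (j : Nat), j ≤ runEnd l j fuel := by
  induction fuel with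
  | zero => intro l j; exact Nat.le_refl j
  | succ fuel ih =>
    intro l j
    unfold runEnd
    split
    · have := ih l (j+1); omega
    · exact Nat.le_refl j

theorem runStart_le (fuel : Nat) : ∀ (l : List String) (j : Nat), runStart l j fuel ≤ j := by
  induction fuel with
  | zero => intro l j; exact Nat.le_refl j
  | succ fuel ih =>
    intro l j
    unfold runStart
    split
    · have := ih l (j-1); omega
    · exact Nat.le_refl j

-- Each loop returns 1 iff such a pattern exists in the scanned range of the list it was
-- handed, and otherwise returns the incoming change flag; the mutations a swap performs
-- never affect the flag, because after a swap the flag is already 1.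

theorem upLoop_spec (fuel : Nat) : ∀ (l : List String) (c : Int) (i : Nat),
    ((∃ k, k < fuel ∧ patU l (i+k)) → (upLoop l c i fuel).2 = 1) ∧
    ((¬ ∃ k, k < fuel ∧ patU l (i+k)) → (upLoop l c i fuel).2 = c) := by
  induction fuel with
  | zero =>
    intro l c i
    exact ⟨fun ⟨k, hk, _⟩ => by omega, fun _ => rfl⟩
  | succ fuel ih =>
    intro l c i
    unfold upLoop
    split
    · rename_i h
      have h0 : patU l (i+0) := by simpa [patU] using h
      refine ⟨fun _ => ?_, fun hn => absurd ⟨0, by omega, h0⟩ hn⟩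
      rcases Classical.em (∃ k, k < fuel ∧ patU ((l.set i "O").set (i+1) ".") (i+1+k)) with he | he
      · exact (ih _ 1 (i+1)).1 he
      · exact (ih _ 1 (i+1)).2 he
    · rename_i h
      constructor
      · rintro ⟨k, hk, hp⟩
        cases k with
        | zero => exact absurd (by simpa [patU] using hp) h
        | succ k =>
          refine (ih l c (i+1)).1 ⟨k, by omega, ?_⟩
          rwa [show i+1+k = i+(k+1) by omega]
      · intro hn
        refine (ih l c (i+1)).2 ?_
        rintro ⟨k, hk, hp⟩
        exact hn ⟨k+1, by omega, by rwa [show i+(k+1) = i+1+k by omega]⟩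

theorem downLoop_spec (i : Nat) : ∀ (l : List String) (c : Int),
    ((∃ k, 1 ≤ k ∧ k ≤ i ∧ patD l k) → (downLoop l c i).2 = 1) ∧
    ((¬ ∃ k, 1 ≤ k ∧ k ≤ i ∧ patD l k) → (downLoop l c i).2 = c) := by
  induction i with
  | zero =>
    intro l c
    exact ⟨fun ⟨k, h1, h2, _⟩ => by omega, fun _ => rfl⟩
  | succ i ih =>
    intro l c
    unfold downLoop
    split
    · rename_i h
      have h0 : patD l (i+1) := by simpa [patD] using h
      refine ⟨fun _ => ?_, fun hn => absurd ⟨i+1, by omega, by omega, h0⟩ hn⟩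
      rcases Classical.em (∃ k, 1 ≤ k ∧ k ≤ i ∧ patD ((l.set (i+1) "O").set i ".") k) with he | he
      · exact (ih _ 1).1 he
      · exact (ih _ 1).2 he
    · rename_i h
      constructor
      · rintro ⟨k, h1, h2, hp⟩
        rcases Nat.lt_or_ge k (i+1) with hk | hk
        · exact (ih l c).1 ⟨k, h1, by omega, hp⟩
        · have : k = i+1 := by omega
          subst this
          exact absurd (by simpa [patD] using hp) h
      · intro hn
        refine (ih l c).2 ?_
        rintro ⟨k, h1, h2, hp⟩
        exact hn ⟨k, h1, by omega, hp⟩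

theorem bUp_spec (fuel : Nat) : ∀ (l : List String) (c : Int) (i : Nat),
    l.length - 1 ≤ i + fuel →
    ((∃ k, i ≤ k ∧ k < l.length - 1 ∧ patU l k) → (bUp l c i fuel).2 = 1) ∧
    ((¬ ∃ k, i ≤ k ∧ k < l.length - 1 ∧ patU l k) → (bUp l c i fuel).2 = c) := by
  induction fuel with
  | zero =>
    intro l c i hf
    exact ⟨fun ⟨k, h1, h2, _⟩ => by omega, fun _ => rfl⟩
  | succ fuel ih =>
    intro l c i hf
    unfold bUp
    split
    · rename_i hi
      split
      · rename_i h
        have h0 : patU l i := by simpa [patU] using h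
        have hj := runEnd_ge l.length l (i+1)
        refine ⟨fun _ => ?_, fun hn => absurd ⟨i, Nat.le_refl i, hi, h0⟩ hn⟩
        have hf' : ((l.set i "O").set (runEnd l (i+1) l.length) ".").length - 1 ≤
            (runEnd l (i+1) l.length + 1) + fuel := by
          simp only [List.length_set]; omega
        rcases Classical.em (∃ k, runEnd l (i+1) l.length + 1 ≤ k ∧
            k < ((l.set i "O").set (runEnd l (i+1) l.length) ".").length - 1 ∧
            patU ((l.set i "O").set (runEnd l (i+1) l.length) ".") k) with he | he
        · exact (ih _ 1 _ hf').1 he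
        · exact (ih _ 1 _ hf').2 he
      · rename_i h
        constructor
        · rintro ⟨k, h1, h2, hp⟩
          refine (ih l c (i+1) (by omega)).1 ⟨k, ?_, h2, hp⟩
          rcases Nat.lt_or_ge k (i+1) with hk | hk
          · have : k = i := by omega
            subst this
            exact absurd hp (by simpa [patU] using h)
          · omega
        · intro hn
          refine (ih l c (i+1) (by omega)).2 ?_
          rintro ⟨k, h1, h2, hp⟩
          exact hn ⟨k, by omega, h2, hp⟩
    · rename_i hi
      exact ⟨fun ⟨k, h1, h2, _⟩ => by omega, fun _ => rfl⟩

theorem bDown_spec (fuel : Nat) : ∀ (l : List String) (c : Int) (i : Nat),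
    i ≤ fuel →
    ((∃ k, 1 ≤ k ∧ k ≤ i ∧ patD l k) → (bDown l c i fuel).2 = 1) ∧
    ((¬ ∃ k, 1 ≤ k ∧ k ≤ i ∧ patD l k) → (bDown l c i fuel).2 = c) := by
  induction fuel with
  | zero =>
    intro l c i hf
    exact ⟨fun ⟨k, h1, h2, _⟩ => by omega, fun _ => rfl⟩
  | succ fuel ih =>
    intro l c i hf
    unfold bDown
    split
    · rename_i hi
      split
      · rename_i h
        have h0 : patD l i := by simpa [patD] using h
        have hj := runStart_le l.length l (i-1)
        refine ⟨fun _ => ?_, fun hn => absurd ⟨i, hi, Nat.le_refl i, h0⟩ hn⟩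
        rcases Classical.em (∃ k, 1 ≤ k ∧ k ≤ runStart l (i-1) l.length - 1 ∧
            patD ((l.set i "O").set (runStart l (i-1) l.length) ".") k) with he | he
        · exact (ih _ 1 _ (by omega)).1 he
        · exact (ih _ 1 _ (by omega)).2 he
      · rename_i h
        constructor
        · rintro ⟨k, h1, h2, hp⟩
          refine (ih l c (i-1) (by omega)).1 ⟨k, h1, ?_, hp⟩
          rcases Nat.lt_or_ge k i with hk | hk
          · omega
          · have : k = i := by omega
            subst this
            exact absurd hp (by simpa [patD] using h)
        · intro hn
          refine (ih l c (i-1) (by omega)).2 ?_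
          rintro ⟨k, h1, h2, hp⟩
          exact hn ⟨k, h1, by omega, hp⟩
    · rename_i hi
      exact ⟨fun ⟨k, h1, h2, _⟩ => by omega, fun _ => rfl⟩

-- ===== VERDICT (by name: the statement is the Claim_ definition above) =====
theorem step_spec : Claim_equal_step := by
  intro l direction _
  unfold Spec_step step step_alt
  split
  · rcases Classical.em (∃ k, 0 ≤ k ∧ k < l.length - 1 ∧ patU l k) with h | h
    · obtain ⟨k, _, hk, hp⟩ := h
      rw [(upLoop_spec (l.length - 1) l 0 0).1 ⟨k, hk, by simpa using hp⟩,
        (bUp_spec l.length l 0 0 (by omega)).1 ⟨k, Nat.zero_le k, hk, hp⟩]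
    · rw [(upLoop_spec (l.length - 1) l 0 0).2 ?_, (bUp_spec l.length l 0 0 (by omega)).2 h]
      rintro ⟨k, hk, hp⟩
      exact h ⟨k, Nat.zero_le k, hk, by simpa using hp⟩
  · rcases Classical.em (∃ k, 1 ≤ k ∧ k ≤ l.length - 1 ∧ patD l k) with h | h
    · rw [(downLoop_spec (l.length - 1) l 0).1 h,
        (bDown_spec l.length l 0 (l.length - 1) (by omega)).1 h]
    · rw [(downLoop_spec (l.length - 1) l 0).2 h,
        (bDown_spec l.length l 0 (l.length - 1) (by omega)).2 h]
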